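-- pv_equiv track=rewrite | github.com/CanineSatsuma6/AdventOfCode | Python/2023/3/1.py | filterNumbers
-- ===== SOURCE A (Python) =====
-- from typing import List, Tuple
--
-- NumberLocation = Tuple[str, int, int]
--
-- def filterNumbers(grid: List[str], locations: List[NumberLocation]) -> List[NumberLocation]:
--     toRemove: List[NumberLocation] = []
--
--     num: str = ""
--     x: int = 0
--     y: int = 0
--     row: int = 0
--     column: int = 0
--
--     # Iterate through all the found numbers in the grid
--     for num, y, x in locations:
--
--         # Get all of the neighboring grid cells around this number. That's all cells above, below, to the side of,
--         # and diagonally adjacent to the current number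
--         neighbors = [(row, column) for row in range(y - 1, y + 2) for column in range(x - 1, x + len(num) + 1)]
--
--         # Remove any of the neighbors that are outside the grid
--         filtered = [(row, column) for (row, column) in neighbors if row >= 0 and column >= 0 and row < len(grid) and column < len(grid[0])]
--
--         # Iterate through all of the neighboring cells of the current number in the grid. Assume we need to remove the
--         # current number from the list of valid numbers
--         keep = False
--         for row, column in filtered:
--             cell = grid[row][column]
--
--             # If we've found a valid symbol that isn't "empty" (a '.'), we can stop searching neighboring cells. We know
--             # we need to keep this number
--             if not cell.isdigit() and not cell.isalpha() and cell != '.':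
--                 keep = True
--                 break
--
--         # If we didn't find a neighboring symbol, mark the current number for removal
--         if not keep:
--             toRemove.append((num, y, x))
--
--     # Return all items in the original "locations" list that we haven't marked for removal
--     return [l for l in locations if l not in toRemove]
-- ===== SOURCE B (Python) =====
-- from typing import List, Tuple
--
-- NumberLocation = Tuple[str, int, int]
--
-- def filterNumbers(grid: List[str], locations: List[NumberLocation]) -> List[NumberLocation]:
--     # Scan the grid once, collecting the coordinates of every symbol cell into a set;
--     # then keep exactly the locations that have a symbol among their neighbors.
--     width = len(grid[0]) if grid else 0
--     symbols = set()
--     for r, rowStr in enumerate(grid):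
--         for c in range(width):
--             ch = rowStr[c]
--             if not ch.isdigit() and not ch.isalpha() and ch != '.':
--                 symbols.add((r, c))
--
--     def nearSymbol(num, y, x):
--         return any((r, c) in symbols
--                    for r in range(y - 1, y + 2)
--                    for c in range(x - 1, x + len(num) + 1))
--
--     return [l for l in locations if nearSymbol(*l)]
-- ===== Notes on version B (the rewrite author's own statement) =====
-- stated objective: idiomatic
-- what changed: Instead of re-scanning neighbor cells per location and building a toRemove list that the final pass searches with 'not in', B scans the grid once into a set of symbol coordinates and keeps each location directly by set-membership tests on its neighbor coordinates.
-- outside the precondition, e.g. on filterNumbers(['ab', '#'], []): A returns [], B raises IndexError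
import Mathlib
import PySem

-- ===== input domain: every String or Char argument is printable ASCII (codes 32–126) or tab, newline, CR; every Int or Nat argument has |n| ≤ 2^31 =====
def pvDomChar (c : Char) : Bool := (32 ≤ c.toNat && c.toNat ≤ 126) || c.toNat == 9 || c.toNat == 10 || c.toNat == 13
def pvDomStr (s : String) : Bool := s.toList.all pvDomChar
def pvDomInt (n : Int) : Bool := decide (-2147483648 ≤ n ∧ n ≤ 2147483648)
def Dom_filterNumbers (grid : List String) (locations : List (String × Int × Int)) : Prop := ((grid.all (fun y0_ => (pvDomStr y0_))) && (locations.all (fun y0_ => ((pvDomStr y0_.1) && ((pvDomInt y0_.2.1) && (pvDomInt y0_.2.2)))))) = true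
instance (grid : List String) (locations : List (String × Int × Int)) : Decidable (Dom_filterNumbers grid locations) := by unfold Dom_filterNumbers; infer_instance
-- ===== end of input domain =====

-- ===== PORT A =====
-- B changes the algorithm (one grid scan into a symbol-coordinate set instead of per-location
-- neighbor rescans and a 'not in toRemove' pass); return values agree on Pre_ (uniform-width grids).

-- the shared symbol test: not cell.isdigit() and not cell.isalpha() and cell != '.'
def pvIsSymbol (c : Char) : Bool := !(PySem.Chars.isdigit c) && !(PySem.Chars.isalpha c) && c != '.'

-- grid[row][column]; the .getD '.' defaults are never reached on inputs satisfying Pre_ (indices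
-- are bounds-checked before access), where this is exact Python indexing.
def pvCellAt (grid : List String) (r c : Int) : Char :=
  (PySem.Str.pyGet? (PySem.List.pyGetD grid r "") c).getD '.'

-- the inner for-loop with break: scan cells, stop at the first symbol
def pvKeepLoop (grid : List String) : List (Int × Int) → Bool
  | [] => false
  | (r, c) :: rest =>
    let cell := pvCellAt grid r c
    if pvIsSymbol cell then true else pvKeepLoop grid rest

def filterNumbers (grid : List String) (locations : List (String × Int × Int)) : List (String × Int × Int) :=
  let toRemove : List (String × Int × Int) := locations.foldl (fun toRemove l =>
    match l with
    | (num, y, x) =>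
      let neighbors := (PySem.List.pyRange (y - 1) (y + 2) 1).flatMap (fun row =>
        (PySem.List.pyRange (x - 1) (x + (num.length : Int) + 1) 1).map (fun column => (row, column)))
      -- len(grid[0]) is only reached (short-circuit) when 0 <= row < len(grid), so grid is
      -- nonempty there and pyGetD grid 0 "" is exactly grid[0]
      let filtered := neighbors.filter (fun rc =>
        0 ≤ rc.1 && 0 ≤ rc.2 && rc.1 < (grid.length : Int) && rc.2 < ((PySem.List.pyGetD grid 0 "").length : Int))
      let keep := pvKeepLoop grid filtered
      if keep then toRemove else toRemove ++ [l]) []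
  locations.filter (fun l => !(toRemove.contains l))

-- ===== PORT B =====
-- one pass over the grid collecting symbol coordinates into a set (Source B's nested for over
-- enumerate(grid) and range(width))
def pvSymbols (grid : List String) : PySem.Set (Int × Int) :=
  let width : Int := if grid = [] then 0 else ((PySem.List.pyGetD grid 0 "").length : Int)
  (PySem.List.enumerate grid 0).foldl (fun s p =>
    (PySem.List.pyRange 0 width 1).foldl (fun s c =>
      let ch := (PySem.Str.pyGet? p.2 c).getD '.'   -- rowStr[c]; exact under Pre_
      if pvIsSymbol ch then PySem.Set.add s (p.1, c) else s) s) PySem.Set.empty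

def filterNumbers_alt (grid : List String) (locations : List (String × Int × Int)) : List (String × Int × Int) :=
  let symbols := pvSymbols grid
  locations.filter (fun l =>
    (PySem.List.pyRange (l.2.1 - 1) (l.2.1 + 2) 1).any (fun r =>
      (PySem.List.pyRange (l.2.2 - 1) (l.2.2 + (l.1.length : Int) + 1) 1).any (fun c =>
        PySem.Set.contains symbols (r, c))))

-- ===== PRECONDITION & SPEC =====
-- Pre_ excludes ragged grids (a row shorter than the first row): there the Python A raises
-- IndexError on grid[row][column] whenever a location's neighbor scan reaches a missing cell
-- (and B's uniform one-pass scan raises on any short row); on the remaining ragged inputs A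
-- happens to return (e.g. with no locations) while B raises, so they stay excluded too.
def Pre_filterNumbers (grid : List String) (locations : List (String × Int × Int)) : Prop :=
  (grid.all (fun row => (grid.headD "").length ≤ row.length)) = true
instance (grid : List String) (locations : List (String × Int × Int)) : Decidable (Pre_filterNumbers grid locations) := by unfold Pre_filterNumbers; infer_instance

def pvWitness_filterNumbers : List String × (List (String × Int × Int)) :=
  (["467..114..", "...*......"], [("467", 0, 0), ("114", 0, 5)])

def Spec_filterNumbers (grid : List String) (locations : List (String × Int × Int)) (out : List (String × Int × Int)) : Prop := out = filterNumbers_alt grid locations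
instance (grid : List String) (locations : List (String × Int × Int)) (out : List (String × Int × Int)) : Decidable (Spec_filterNumbers grid locations out) := by unfold Spec_filterNumbers; infer_instance

-- ===== CLAIM (what is proved, stated in full; the proofs are below) =====
def Claim_equal_filterNumbers : Prop := ∀ (grid : List String) (locations : List (String × Int × Int)), Dom_filterNumbers grid locations → Pre_filterNumbers grid locations → Spec_filterNumbers grid locations (filterNumbers grid locations)

-- ===== LEMMAS AND PROOFS =====

-- the break-loop is List.any of the symbol test
theorem pvKeepLoop_eq_any (grid : List String) (l : List (Int × Int)) :
    pvKeepLoop grid l = l.any (fun rc => pvIsSymbol (pvCellAt grid rc.1 rc.2)) := by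
  induction l with
  | nil => rfl
  | cons hd tl ih =>
    obtain ⟨r, c⟩ := hd
    simp [pvKeepLoop, ih]

-- membership in a fold that conditionally adds to a set
theorem mem_foldl_step {α β : Type} (x : α) [BEq α] [LawfulBEq α]
    (step : PySem.Set α → β → PySem.Set α) (Q : β → Prop)
    (h : ∀ s b, x ∈ step s b ↔ x ∈ s ∨ Q b) :
    ∀ (l : List β) (s : PySem.Set α), x ∈ l.foldl step s ↔ x ∈ s ∨ ∃ b ∈ l, Q b := by
  intro l
  induction l with
  | nil => simp
  | cons b tl ih =>
    intro s
    simp only [List.foldl_cons, ih, h, List.mem_cons]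
    constructor
    · rintro ((hs | hq) | ⟨b', hb', hq⟩)
      · exact Or.inl hs
      · exact Or.inr ⟨b, Or.inl rfl, hq⟩
      · exact Or.inr ⟨b', Or.inr hb', hq⟩
    · rintro (hs | ⟨b', (rfl | hb'), hq⟩)
      · exact Or.inl (Or.inl hs)
      · exact Or.inl (Or.inr hq)
      · exact Or.inr ⟨b', hb', hq⟩

-- what is in the symbol set
theorem mem_pvSymbols (grid : List String) (r c : Int) :
    (r, c) ∈ pvSymbols grid ↔
      0 ≤ r ∧ r < (grid.length : Int) ∧ 0 ≤ c ∧ c < ((PySem.List.pyGetD grid 0 "").length : Int) ∧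
        pvIsSymbol (pvCellAt grid r c) = true := by
  unfold pvSymbols
  rw [PySem.List.enumerate_eq_map_pyRange (d := ""), List.foldl_map]
  refine Iff.trans (mem_foldl_step (x := (r, c))
    (step := fun s j =>
      (PySem.List.pyRange 0 (if grid = [] then 0 else ((PySem.List.pyGetD grid 0 "").length : Int)) 1).foldl
        (fun s c' => if pvIsSymbol ((PySem.Str.pyGet? (PySem.List.pyGetD grid j "") c').getD '.')
          then PySem.Set.add s (j, c') else s) s)
    (Q := fun j => ∃ c' ∈ PySem.List.pyRange 0 (if grid = [] then 0 else ((PySem.List.pyGetD grid 0 "").length : Int)) 1,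
      (r, c) = (j, c') ∧ pvIsSymbol (pvCellAt grid j c') = true)
    ?_ (PySem.List.pyRange 0 (grid.length : Int) 1) PySem.Set.empty) ?_
  · intro s j
    refine Iff.trans (mem_foldl_step (x := (r, c))
      (step := fun s c' => if pvIsSymbol ((PySem.Str.pyGet? (PySem.List.pyGetD grid j "") c').getD '.')
        then PySem.Set.add s (j, c') else s)
      (Q := fun c' => (r, c) = (j, c') ∧ pvIsSymbol (pvCellAt grid j c') = true)
      ?_ _ s) Iff.rfl
    intro s' c'
    dsimp only
    split_ifs with hsym
    · rw [PySem.Set.mem_add]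
      constructor
      · rintro (h | h)
        · exact Or.inl h
        · exact Or.inr ⟨h, hsym⟩
      · rintro (h | ⟨heq, _⟩)
        · exact Or.inl h
        · exact Or.inr heq
    · constructor
      · exact Or.inl
      · rintro (h | ⟨heq, hsym'⟩)
        · exact h
        · exact absurd hsym' hsym
  · have hempty : ((r, c) ∈ (PySem.Set.empty : PySem.Set (Int × Int))) ↔ False := by
      simp [PySem.Set.empty]
    constructor
    · rintro (h | ⟨j, hj, c', hc', heq, hsym⟩)
      · exact absurd h (by simp [PySem.Set.empty])
      · obtain ⟨rfl, rfl⟩ : r = j ∧ c = c' := by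
          simpa [Prod.ext_iff] using heq
        rw [PySem.List.mem_pyRange_one] at hj hc'
        have hne : grid ≠ [] := by
          intro h0; subst h0; simp at hj; omega
        rw [if_neg hne] at hc'
        exact ⟨hj.1, hj.2, hc'.1, hc'.2, hsym⟩
    · rintro ⟨h1, h2, h3, h4, h5⟩
      have hne : grid ≠ [] := by
        intro h0; subst h0; simp at h2; omega
      refine Or.inr ⟨r, ?_, c, ?_, rfl, h5⟩
      · rw [PySem.List.mem_pyRange_one]; exact ⟨h1, h2⟩
      · rw [PySem.List.mem_pyRange_one, if_neg hne]; exact ⟨h3, h4⟩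

-- per location, A's keep decision equals B's symbol-set test
theorem keep_eq (grid : List String) (num : String) (y x : Int) :
    pvKeepLoop grid
      (((PySem.List.pyRange (y - 1) (y + 2) 1).flatMap (fun row =>
        (PySem.List.pyRange (x - 1) (x + (num.length : Int) + 1) 1).map (fun column => (row, column)))).filter
        (fun rc => 0 ≤ rc.1 && 0 ≤ rc.2 && rc.1 < (grid.length : Int) && rc.2 < ((PySem.List.pyGetD grid 0 "").length : Int)))
    = (PySem.List.pyRange (y - 1) (y + 2) 1).any (fun r =>
        (PySem.List.pyRange (x - 1) (x + (num.length : Int) + 1) 1).any (fun c =>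
          PySem.Set.contains (pvSymbols grid) (r, c))) := by
  rw [pvKeepLoop_eq_any]
  rw [Bool.eq_iff_iff]
  simp only [List.any_eq_true, List.mem_filter, List.mem_flatMap, List.mem_map,
    PySem.Set.contains_iff]
  constructor
  · rintro ⟨⟨r, c⟩, ⟨⟨row, hrow, col, hcol, heq⟩, hbounds⟩, hsym⟩
    cases heq
    simp only [Bool.and_eq_true, decide_eq_true_eq] at hbounds
    exact ⟨r, hrow, c, hcol, (mem_pvSymbols grid r c).2
      ⟨hbounds.1.1.1, hbounds.1.2, hbounds.1.1.2, hbounds.2, hsym⟩⟩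
  · rintro ⟨r, hr, c, hc, hmem⟩
    obtain ⟨h1, h2, h3, h4, h5⟩ := (mem_pvSymbols grid r c).1 hmem
    refine ⟨(r, c), ⟨⟨r, hr, c, hc, rfl⟩, ?_⟩, h5⟩
    simp only [Bool.and_eq_true, decide_eq_true_eq]
    exact ⟨⟨⟨h1, h3⟩, h2⟩, h4⟩

-- the toRemove accumulator is a filter over locations
theorem toRemove_eq (grid : List String) (locations : List (String × Int × Int)) (acc : List (String × Int × Int)) :
    locations.foldl (fun toRemove l =>
      match l with
      | (num, y, x) =>
        let neighbors := (PySem.List.pyRange (y - 1) (y + 2) 1).flatMap (fun row =>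
          (PySem.List.pyRange (x - 1) (x + (num.length : Int) + 1) 1).map (fun column => (row, column)))
        let filtered := neighbors.filter (fun rc =>
          0 ≤ rc.1 && 0 ≤ rc.2 && rc.1 < (grid.length : Int) && rc.2 < ((PySem.List.pyGetD grid 0 "").length : Int))
        let keep := pvKeepLoop grid filtered
        if keep then toRemove else toRemove ++ [l]) acc
    = acc ++ locations.filter (fun l =>
        match l with
        | (num, y, x) =>
          !(pvKeepLoop grid
            (((PySem.List.pyRange (y - 1) (y + 2) 1).flatMap (fun row =>
              (PySem.List.pyRange (x - 1) (x + (num.length : Int) + 1) 1).map (fun column => (row, column)))).filter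
              (fun rc => 0 ≤ rc.1 && 0 ≤ rc.2 && rc.1 < (grid.length : Int) && rc.2 < ((PySem.List.pyGetD grid 0 "").length : Int))))) := by
  induction locations generalizing acc with
  | nil => simp
  | cons l tl ih =>
    obtain ⟨num, y, x⟩ := l
    simp only [List.foldl_cons, List.filter_cons]
    by_cases hk : pvKeepLoop grid
        (((PySem.List.pyRange (y - 1) (y + 2) 1).flatMap (fun row =>
          (PySem.List.pyRange (x - 1) (x + (num.length : Int) + 1) 1).map (fun column => (row, column)))).filter
          (fun rc => 0 ≤ rc.1 && 0 ≤ rc.2 && rc.1 < (grid.length : Int) && rc.2 < ((PySem.List.pyGetD grid 0 "").length : Int))) = true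
    · simp [hk, ih]
    · simp only [Bool.not_eq_true] at hk
      simp [hk, ih]

-- ===== VERDICT (by name: the statement is the Claim_ definition above) =====
theorem filterNumbers_spec : Claim_equal_filterNumbers := by
  intro grid locations _hdom _hpre
  unfold Spec_filterNumbers filterNumbers filterNumbers_alt
  rw [toRemove_eq]
  rw [List.nil_append]
  apply List.filter_congr
  intro l hl
  obtain ⟨num, y, x⟩ := l
  have hcontains : ∀ (xs : List (String × Int × Int)) (a : String × Int × Int),
      xs.contains a = decide (a ∈ xs) := by
    intro xs a
    rw [Bool.eq_iff_iff]
    simp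
  rw [hcontains]
  rw [Bool.eq_iff_iff]
  simp only [Bool.not_eq_true', decide_eq_false_iff_not, List.mem_filter]
  rw [keep_eq]
  constructor
  · intro h
    by_contra hB
    simp only [Bool.not_eq_true] at hB
    exact h ⟨hl, hB⟩
  · intro hB hmem
    rw [hmem.2] at hB
    simp at hB
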